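-- pv_equiv track=rewrite | github.com/pypi-data/pypi-mirror-386 | packages/kptopic/kptopic-0.0.1-py3-none-any.whl/KPTopic/basemodes/text_edges.py | targList
-- ===== SOURCE A (Python) =====
-- from collections import defaultdict
--
-- def targList(mylist):
--   D = defaultdict(list)
--   for i,item in enumerate(mylist):
--       D[item].append(i)
--   D = {k:v for k,v in D.items() if len(v)>1}
--   for key in D.keys():
--     for i in range(1,len(D[key])):
--       node_index = D[key][i]
--       mylist[node_index] = mylist[node_index] +str(i)
--   return mylist
-- ===== SOURCE B (Python) =====
-- def targList(mylist):
--   seen = {}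
--   for i, item in enumerate(mylist):
--     if item in seen:
--       seen[item] += 1
--       mylist[i] = mylist[i] + str(seen[item])
--     else:
--       seen[item] = 0
--   return mylist
-- ===== Notes on version B (the rewrite author's own statement) =====
-- stated objective: simpler
-- what changed: A builds a defaultdict mapping each value to the list of all its indices and then runs a second nested pass over the duplicated keys appending suffixes; B does one forward pass keeping a dict of per-value occurrence counters and appends the suffix the moment a repeat is seen.
import Mathlib
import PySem

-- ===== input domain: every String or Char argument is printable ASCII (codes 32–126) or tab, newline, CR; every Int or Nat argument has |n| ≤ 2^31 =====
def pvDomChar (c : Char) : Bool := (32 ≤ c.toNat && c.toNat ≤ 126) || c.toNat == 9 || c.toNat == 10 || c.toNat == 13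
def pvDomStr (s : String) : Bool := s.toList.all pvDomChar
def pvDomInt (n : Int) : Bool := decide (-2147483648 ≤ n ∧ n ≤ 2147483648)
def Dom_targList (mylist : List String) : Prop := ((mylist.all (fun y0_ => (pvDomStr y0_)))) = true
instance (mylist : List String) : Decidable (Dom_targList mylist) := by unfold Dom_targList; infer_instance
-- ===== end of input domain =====

-- B replaces A's index-table dict plus second update pass by a single forward pass with a
-- dict of per-value occurrence counters (objective: simpler, one pass instead of two).
-- Python A mutates mylist in place and returns it; B performs the same in-place mutation;
-- the equivalence proved here is about the RETURN value.

-- ===== PORT A =====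
def targList (mylist : List String) : List String :=
  let D : PySem.Dict String (List Int) :=
    (PySem.List.enumerate mylist 0).foldl
      (fun d p => d.modify p.2 [] (fun v => v ++ [p.1])) PySem.Dict.empty
  let D2 : PySem.Dict String (List Int) :=
    PySem.Dict.ofList (D.items.filter (fun kv => 1 < kv.2.length))
  D2.keys.foldl (fun acc key =>
    (PySem.List.pyRange 1 ((D2.getD key []).length : Int)).foldl
      (fun acc i =>
        let node_index := PySem.List.pyGetD (D2.getD key []) i 0
        PySem.List.pySetD acc node_index
          (PySem.List.pyGetD acc node_index "" ++ PySem.Int.toStr i))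
      acc) mylist

-- ===== PORT B =====
def targList_alt (mylist : List String) : List String :=
  ((PySem.List.enumerate mylist 0).foldl
    (fun (st : PySem.Dict String Int × List String) p =>
      if st.1.contains p.2 then
        let seen' := st.1.insert p.2 (st.1.getD p.2 0 + 1)
        (seen', PySem.List.pySetD st.2 p.1
          (PySem.List.pyGetD st.2 p.1 "" ++ PySem.Int.toStr (seen'.getD p.2 0)))
      else (st.1.insert p.2 0, st.2))
    (PySem.Dict.empty, mylist)).2

-- ===== PRECONDITION & SPEC =====
def Spec_targList (mylist : List String) (out : List String) : Prop := out = targList_alt mylist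
instance (mylist : List String) (out : List String) : Decidable (Spec_targList mylist out) := by unfold Spec_targList; infer_instance

-- ===== CLAIM (what is proved, stated in full; the proofs are below) =====
def Claim_equal_targList : Prop := ∀ (mylist : List String), Dom_targList mylist → Spec_targList mylist (targList mylist)

-- ===== LEMMAS AND PROOFS =====
def pvLk (orig : List String) (k : String) : List Int :=
  ((PySem.List.enumerate orig 0).filter (fun p => p.2 == k)).map (fun p => p.1)

def pvK2 (orig : List String) : List String :=
  (PySem.Set.ofList orig).filter (fun k => decide (1 < (pvLk orig k).length))

def pvUpd (acc : List String) (p : Int × Int) : List String :=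
  PySem.List.pySetD acc p.1 (PySem.List.pyGetD acc p.1 "" ++ PySem.Int.toStr p.2)

def pvU (orig : List String) : List (Int × Int) :=
  (pvK2 orig).flatMap (fun k =>
    (PySem.List.pyRange 1 ((pvLk orig k).length : Int)).map
      (fun i => (PySem.List.pyGetD (pvLk orig k) i 0, i)))

-- length of pvLk = count
theorem length_pvLk (orig : List String) (k : String) :
    (pvLk orig k).length = orig.count k := by
  rw [pvLk, List.length_map]
  have hc : List.count k orig
      = List.countP (fun p => p.2 == k) (PySem.List.enumerate orig 0) := by
    conv_lhs => rw [← PySem.List.map_snd_enumerate orig 0]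
    rw [List.count_eq_countP, List.countP_map]
    rfl
  rw [hc]
  exact List.countP_eq_length_filter.symm

-- occurrence characterization, generalized over the enumerate start
theorem occ_spec_aux (k : String) : ∀ (orig : List String) (s i : Nat),
    i < (((PySem.List.enumerate orig (s : Int)).filter (fun p => p.2 == k)).map
      (fun p => p.1)).length →
    ∃ m : Nat,
      (((PySem.List.enumerate orig (s : Int)).filter (fun p => p.2 == k)).map
        (fun p => p.1))[i]? = some ((s + m : Nat) : Int) ∧
      ∃ hm : m < orig.length, orig[m] = k ∧ (orig.take m).count k = i := by
  intro orig
  induction orig with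
  | nil => intro s i h; simp [PySem.List.enumerate_nil] at h
  | cons x rest ih =>
    intro s i h
    simp only [PySem.List.enumerate_cons] at h ⊢
    by_cases hx : x = k
    · subst hx
      rw [List.filter_cons_of_pos (by simp)] at h ⊢
      match i with
      | 0 =>
        exact ⟨0, by simp, by simp, rfl, by simp⟩
      | i + 1 =>
        have hcast : ((s : Int) + 1) = ((s + 1 : Nat) : Int) := by push_cast; ring
        rw [hcast] at h ⊢
        have h' := ih (s+1) i (by simpa using h)
        obtain ⟨m, hL, hm, hk, hcnt⟩ := h'
        refine ⟨m + 1, ?_, by simpa using hm, by simpa using hk, ?_⟩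
        · rw [List.map_cons, List.getElem?_cons_succ, hL]
          congr 2
          omega
        · rw [List.take_succ_cons, List.count_cons_self, hcnt]
    · rw [List.filter_cons_of_neg (by simpa using hx)] at h ⊢
      have hcast : ((s : Int) + 1) = ((s + 1 : Nat) : Int) := by push_cast; ring
      rw [hcast] at h ⊢
      have h' := ih (s+1) i (by simpa using h)
      obtain ⟨m, hL, hm, hk, hcnt⟩ := h'
      refine ⟨m + 1, ?_, by simpa using hm, by simpa using hk, ?_⟩
      · rw [hL]; congr 2; omega
      · rw [List.take_succ_cons, List.count_cons_of_ne (by simpa using hx), hcnt]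

theorem occ_spec (orig : List String) (k : String) :
    ∀ (i : Nat) (h : i < (pvLk orig k).length),
      ∃ m : Nat, (pvLk orig k)[i] = (m : Int) ∧ ∃ hm : m < orig.length,
        orig[m] = k ∧ (orig.take m).count k = i := by
  intro i h
  have := occ_spec_aux k orig 0 i (by simpa [pvLk] using h)
  obtain ⟨m, hL, hm, hk, hcnt⟩ := this
  refine ⟨m, ?_, hm, hk, hcnt⟩
  have : (pvLk orig k)[i]? = some ((m : Nat) : Int) := by simpa [pvLk] using hL
  rw [List.getElem?_eq_getElem h] at this
  exact Option.some.inj this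

theorem count_take_lt (orig : List String) (k : String) (m j : Nat)
    (hmj : m < j) (_hjle : j ≤ orig.length) (hm : m < orig.length) (hk : orig[m] = k) :
    (orig.take m).count k < (orig.take j).count k := by
  have h1 : orig.take (m+1) = orig.take m ++ [orig[m]] := by
    rw [List.take_add_one, List.getElem?_eq_getElem hm]; rfl
  have h2 : (orig.take (m+1)).count k = (orig.take m).count k + 1 := by
    rw [h1, List.count_append, hk]; simp
  have h3 : orig.take (m+1) = (orig.take j).take (m+1) := by
    rw [List.take_take, min_eq_left (by omega)]
  have h4 : (orig.take (m+1)).count k ≤ (orig.take j).count k := by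
    rw [h3]
    exact ((orig.take j).take_sublist (m+1)).count_le k
  omega

theorem occ_unique (orig : List String) (k : String) (m j : Nat)
    (hm : m < orig.length) (hj : j < orig.length)
    (hkm : orig[m] = k) (hkj : orig[j] = k)
    (hc : (orig.take m).count k = (orig.take j).count k) : m = j := by
  rcases lt_trichotomy m j with h | h | h
  · exact absurd hc (Nat.ne_of_lt (count_take_lt orig k m j h (le_of_lt hj) hm hkm))
  · exact h
  · exact absurd hc.symm (Nat.ne_of_lt (count_take_lt orig k j m h (le_of_lt hm) hj hkj))

theorem mem_pvLk (orig : List String) (k : String) (x : Int) (hx : x ∈ pvLk orig k) :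
    ∃ m : Nat, x = (m : Int) ∧ ∃ hm : m < orig.length, orig[m] = k := by
  rw [pvLk] at hx
  obtain ⟨p, hp, hx⟩ := List.mem_map.mp hx
  have hpf := List.of_mem_filter hp
  have hpm := List.mem_of_mem_filter hp
  rw [PySem.List.mem_enumerate_iff] at hpm
  obtain ⟨m, hm, rfl⟩ := hpm
  exact ⟨m, by simpa using hx.symm, hm, by simpa using hpf⟩

theorem pairwise_lt_pvLk (orig : List String) (k : String) :
    (pvLk orig k).Pairwise (· < ·) := by
  rw [pvLk, List.pairwise_map]
  exact (PySem.List.pairwise_lt_enumerate orig 0).sublist List.filter_sublist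

theorem nodup_pvLk (orig : List String) (k : String) : (pvLk orig k).Nodup := by
  exact (pairwise_lt_pvLk orig k).imp ne_of_lt

theorem pyRange_eq_nil_of_le {a b : Int} (h : b ≤ a) : PySem.List.pyRange a b = [] := by
  rw [List.eq_nil_iff_forall_not_mem]
  intro x hx
  rw [PySem.List.mem_pyRange_one] at hx
  omega

theorem map_pyGetD_range_aux (xs : List Int) :
    ∀ (n s : Nat), xs.length - s = n → s ≤ xs.length →
    (PySem.List.pyRange (s : Int) (xs.length : Int)).map
      (fun i => PySem.List.pyGetD xs i 0) = xs.drop s := by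
  intro n
  induction n with
  | zero =>
    intro s hn hs
    have hse : s = xs.length := by omega
    subst hse
    rw [pyRange_eq_nil_of_le (le_refl _), List.map_nil, List.drop_of_length_le (le_refl _)]
  | succ n ih =>
    intro s hn hs
    have hlt : s < xs.length := by omega
    rw [PySem.List.pyRange_one_cons (by exact_mod_cast hlt), List.map_cons]
    have hcast : ((s : Int) + 1) = ((s + 1 : Nat) : Int) := by push_cast; ring
    rw [hcast, ih (s+1) (by omega) (by omega)]
    rw [PySem.List.pyGetD_natCast, List.getD_eq_getElem _ _ hlt]
    rw [List.drop_eq_getElem_cons hlt]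

theorem map_fst_pvU (orig : List String) :
    (pvU orig).map (fun p => p.1) = (pvK2 orig).flatMap (fun k => (pvLk orig k).drop 1) := by
  rw [pvU, List.map_flatMap]
  refine List.flatMap_congr ?_
  intro k hk
  rw [List.map_map]
  have hk2 := List.of_mem_filter hk
  have hlen : 1 < (pvLk orig k).length := by simpa using hk2
  exact map_pyGetD_range_aux (pvLk orig k) ((pvLk orig k).length - 1) 1 rfl (by omega)

theorem nodup_pvK2 (orig : List String) : (pvK2 orig).Nodup :=
  (PySem.Set.nodup_ofList orig).filter _

theorem nodup_fst_pvU (orig : List String) : ((pvU orig).map (fun p => p.1)).Nodup := by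
  rw [map_fst_pvU, List.flatMap_def, List.nodup_flatten]
  constructor
  · intro l hl
    obtain ⟨k, _, rfl⟩ := List.mem_map.mp hl
    exact ((nodup_pvLk orig k).sublist (List.drop_sublist _ _))
  · rw [List.pairwise_map]
    refine (nodup_pvK2 orig).imp ?_
    intro k k' hne x hx hx'
    have h1 := mem_pvLk orig k x (List.mem_of_mem_drop hx)
    have h2 := mem_pvLk orig k' x (List.mem_of_mem_drop hx')
    obtain ⟨m, rfl, hm, hkm⟩ := h1
    obtain ⟨m', hmm', hm', hkm'⟩ := h2
    have : m = m' := by exact_mod_cast hmm'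
    subst this
    exact hne (hkm ▸ hkm')

-- the index-table dict D of A
theorem targ_eq_fold (mylist : List String) :
    targList mylist = (pvU mylist).foldl pvUpd mylist := by
  simp only [targList]
  set D : PySem.Dict String (List Int) :=
    (PySem.List.enumerate mylist 0).foldl
      (fun d p => d.modify p.2 [] (fun v => v ++ [p.1])) PySem.Dict.empty with hD
  have hDget : ∀ k, D.getD k [] = pvLk mylist k := by
    intro k
    rw [hD]
    have h1 : (PySem.List.enumerate mylist 0).foldl
        (fun d p => d.modify p.2 [] (fun v => v ++ [p.1])) PySem.Dict.empty
        = ((PySem.List.enumerate mylist 0).map (fun p => (p.2, p.1))).foldl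
          (fun d q => d.modify q.1 [] (fun v => v ++ [q.2])) PySem.Dict.empty :=
      (List.foldl_map (f := fun p : Int × String => (p.2, p.1))
        (g := fun (d : PySem.Dict String (List Int)) q => d.modify q.1 [] (fun v => v ++ [q.2]))
        (l := PySem.List.enumerate mylist 0) (init := PySem.Dict.empty)).symm
    rw [h1, PySem.Dict.getD_foldl_modify_append]
    rw [PySem.Dict.getD_empty, List.nil_append, List.filter_map, List.map_map]
    rfl
  have hDkeys : D.keys = PySem.Set.ofList mylist := by
    rw [hD]
    rw [PySem.Dict.keys_foldl_modify_key (PySem.List.enumerate mylist 0)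
      (fun p => p.2) ([] : List Int) (fun _ p => fun v => v ++ [p.1]) PySem.Dict.empty]
    rw [PySem.List.map_snd_enumerate]
    exact PySem.Set.update_empty mylist
  have hDnodup : D.keys.Nodup := by
    rw [hDkeys]; exact PySem.Set.nodup_ofList mylist
  have hpairs : D.items.filter (fun kv => 1 < kv.2.length)
      = (pvK2 mylist).map (fun k => (k, pvLk mylist k)) := by
    rw [PySem.Dict.items_eq_map_keys D hDnodup [], hDkeys, List.filter_map]
    have : ∀ k, D.getD k [] = pvLk mylist k := hDget
    simp only [hDget]
    rfl
  set D2 : PySem.Dict String (List Int) :=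
    PySem.Dict.ofList (D.items.filter (fun kv => 1 < kv.2.length)) with hD2
  have hD2items : D2.items = (pvK2 mylist).map (fun k => (k, pvLk mylist k)) := by
    rw [hD2, hpairs]
    have := PySem.Dict.items_foldl_insert_fresh
      ((pvK2 mylist).map (fun k => (k, pvLk mylist k)))
      (fun a => a.1) (fun a => a.2) PySem.Dict.empty
      (by intro a _; exact PySem.Dict.contains_empty a.1)
      (by rw [List.map_map]
          have : ((fun a => a.1) ∘ (fun k => (k, pvLk mylist k))) = id := rfl
          rw [this, List.map_id]
          exact nodup_pvK2 mylist)
    simpa using this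
  have hD2keys : D2.keys = pvK2 mylist := by
    have : D2.keys = D2.items.map (fun p => p.1) := rfl
    rw [this, hD2items, List.map_map]
    have : ((fun p : String × List Int => p.1) ∘ (fun k => (k, pvLk mylist k))) = id := rfl
    rw [this, List.map_id]
  have hD2nodup : D2.keys.Nodup := by rw [hD2keys]; exact nodup_pvK2 mylist
  have hD2get : ∀ k ∈ pvK2 mylist, D2.getD k [] = pvLk mylist k := by
    intro k hk
    refine PySem.Dict.getD_of_mem_items D2 ?_ hD2nodup []
    rw [hD2items]
    exact List.mem_map_of_mem hk
  rw [hD2keys]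
  have hcong := PySem.List.foldl_congr_mem
    (l := pvK2 mylist)
    (f := fun acc key =>
      (PySem.List.pyRange 1 ((D2.getD key []).length : Int)).foldl
        (fun acc i =>
          let node_index := PySem.List.pyGetD (D2.getD key []) i 0
          PySem.List.pySetD acc node_index
            (PySem.List.pyGetD acc node_index "" ++ PySem.Int.toStr i)) acc)
    (g := fun acc key =>
      ((PySem.List.pyRange 1 ((pvLk mylist key).length : Int)).map
        (fun i => (PySem.List.pyGetD (pvLk mylist key) i 0, i))).foldl pvUpd acc)
    (init := mylist)
    (by intro acc k hk
        simp only [hD2get k hk]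
        rw [List.foldl_map]
        rfl)
  rw [hcong, pvU, List.foldl_flatMap]


-- (A)
theorem pvU_mem_spec (orig : List String) (p : Int × Int) (hp : p ∈ pvU orig) :
    ∃ m : Nat, p.1 = (m : Int) ∧ ∃ hm : m < orig.length,
      1 ≤ (orig.take m).count orig[m] ∧ p.2 = ((orig.take m).count orig[m] : Int) := by
  rw [pvU] at hp
  obtain ⟨k, hk, hp⟩ := List.mem_flatMap.mp hp
  obtain ⟨i, hi, rfl⟩ := List.mem_map.mp hp
  rw [PySem.List.mem_pyRange_one] at hi
  have hilen : i < ((pvLk orig k).length : Int) := hi.2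
  have hi1 : 1 ≤ i := hi.1
  have hiN : i.toNat < (pvLk orig k).length := by omega
  have hieq : i = ((i.toNat : Nat) : Int) := by omega
  obtain ⟨m, hL, hm, hkm, hcnt⟩ := occ_spec orig k i.toNat hiN
  refine ⟨m, ?_, hm, ?_, ?_⟩
  · simp only
    rw [hieq, PySem.List.pyGetD_natCast, List.getD_eq_getElem _ _ hiN, hL]
  · rw [hkm, hcnt]; omega
  · simp only
    rw [hkm, hcnt]; omega

-- (B)
theorem count_lt_count (orig : List String) (j : Nat) (hj : j < orig.length) :
    (orig.take j).count orig[j] < orig.count orig[j] := by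
  have h := count_take_lt orig orig[j] j orig.length (by omega) (le_refl _) hj rfl
  rwa [List.take_of_length_le (le_refl _)] at h

theorem pvU_mem_of (orig : List String) (j : Nat) (hj : j < orig.length)
    (hc : 1 ≤ (orig.take j).count orig[j]) :
    ((j : Int), ((orig.take j).count orig[j] : Int)) ∈ pvU orig := by
  set k := orig[j] with hkdef
  set c := (orig.take j).count k with hcdef
  have htot : c < orig.count k := count_lt_count orig j hj
  have hk2 : k ∈ pvK2 orig := by
    rw [pvK2]
    refine List.mem_filter.mpr ⟨(PySem.Set.mem_ofList _ _).mpr (List.getElem_mem hj), ?_⟩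
    rw [length_pvLk]
    simp only [decide_eq_true_eq]
    omega
  rw [pvU]
  refine List.mem_flatMap.mpr ⟨k, hk2, ?_⟩
  refine List.mem_map.mpr ⟨(c : Int), ?_, ?_⟩
  · rw [PySem.List.mem_pyRange_one]
    constructor
    · exact_mod_cast hc
    · rw [length_pvLk]; exact_mod_cast htot
  · have hcN : c < (pvLk orig k).length := by rw [length_pvLk]; exact htot
    obtain ⟨m, hL, hm, hkm, hcnt⟩ := occ_spec orig k c hcN
    have hmj : m = j := occ_unique orig k m j hm hj hkm rfl (by rw [hcnt])
    subst hmj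
    rw [PySem.List.pyGetD_natCast, List.getD_eq_getElem _ _ hcN, hL]

theorem length_foldl_pvUpd (ups : List (Int × Int)) (acc : List String) :
    (ups.foldl pvUpd acc).length = acc.length := by
  induction ups generalizing acc with
  | nil => rfl
  | cons p rest ih => rw [List.foldl_cons, ih, pvUpd, PySem.List.length_pySetD]

theorem foldl_pvUpd_getElem (ups : List (Int × Int)) :
    ∀ (acc : List String),
    ((ups.map (fun p => p.1)).Pairwise (· ≠ ·)) →
    (∀ p ∈ ups, ∃ m : Nat, p.1 = (m : Int) ∧ m < acc.length) →
    ∀ (j : Nat) (hj : j < acc.length),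
    (ups.foldl pvUpd acc)[j]'(by rw [length_foldl_pvUpd]; exact hj)
      = match ups.find? (fun p => p.1 == (j : Int)) with
        | some p => acc[j] ++ PySem.Int.toStr p.2
        | none => acc[j] := by
  induction ups with
  | nil => intro acc _ _ j hj; simp
  | cons p rest ih =>
    intro acc hdist hin j hj
    obtain ⟨m, hpm, hmlt⟩ := hin p (List.mem_cons_self)
    have hacc' : pvUpd acc p = acc.set m (acc[m]'hmlt ++ PySem.Int.toStr p.2) := by
      rw [pvUpd, hpm, PySem.List.pySetD_natCast, PySem.List.pyGetD_natCast,
        List.getD_eq_getElem _ _ hmlt]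
    have hlen' : (pvUpd acc p).length = acc.length := by
      rw [pvUpd, PySem.List.length_pySetD]
    have hdist' : ((rest.map (fun p => p.1)).Pairwise (· ≠ ·)) :=
      (List.pairwise_cons.mp hdist).2
    have hnotin : ∀ q ∈ rest, q.1 ≠ p.1 := by
      intro q hq
      exact fun h => (List.pairwise_cons.mp hdist).1 q.1 (List.mem_map_of_mem hq) h.symm
    have hin' : ∀ q ∈ rest, ∃ m : Nat, q.1 = (m : Int) ∧ m < (pvUpd acc p).length := by
      intro q hq
      obtain ⟨m', hq1, hq2⟩ := hin q (List.mem_cons_of_mem _ hq)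
      exact ⟨m', hq1, by rw [hlen']; exact hq2⟩
    simp only [List.foldl_cons]
    by_cases hjm : m = j
    · subst hjm
      have hfind : rest.find? (fun q => q.1 == (m : Int)) = none := by
        rw [List.find?_eq_none]
        intro q hq
        simpa [hpm] using hnotin q hq
      have := ih (pvUpd acc p) hdist' hin' m (by rw [hlen']; exact hj)
      rw [hfind] at this
      have hfind2 : (p :: rest).find? (fun q => q.1 == (m : Int)) = some p := by
        rw [List.find?_cons_of_pos]
        simp [hpm]
      rw [hfind2, this]
      simp only [hacc']
      simp
    · have := ih (pvUpd acc p) hdist' hin' j (by rw [hlen']; exact hj)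
      have hsetne : (pvUpd acc p)[j]'(by rw [hlen']; exact hj) = acc[j]'hj := by
        simp only [hacc']
        exact List.getElem_set_ne (by omega) _
      have hfindc : (p :: rest).find? (fun q => q.1 == (j : Int))
          = rest.find? (fun q => q.1 == (j : Int)) := by
        rw [List.find?_cons_of_neg]
        simp [hpm]
        omega
      rw [hfindc, this, hsetne]

def pvSuf (orig : List String) (j : Nat) (s : String) : String :=
  if (orig.take j).count s = 0 then s
  else s ++ PySem.Int.toStr ((orig.take j).count s : Int)

def pvRef (orig : List String) : List String :=
  orig.mapIdx (fun j s => pvSuf orig j s)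

theorem length_pvRef (orig : List String) : (pvRef orig).length = orig.length := by
  simp [pvRef]

theorem pvRef_getElem (orig : List String) (j : Nat) (h : j < orig.length) :
    (pvRef orig)[j]'(by simpa [length_pvRef] using h) = pvSuf orig j orig[j] := by
  simp [pvRef]

theorem targ_eq_pvRef (mylist : List String) : targList mylist = pvRef mylist := by
  rw [targ_eq_fold]
  have hlen : ((pvU mylist).foldl pvUpd mylist).length = mylist.length :=
    length_foldl_pvUpd _ _
  apply List.ext_getElem (by rw [hlen, length_pvRef])
  intro j hj1 hj2
  have hj : j < mylist.length := by rwa [hlen] at hj1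
  have hdist : ((pvU mylist).map (fun p => p.1)).Pairwise (· ≠ ·) := nodup_fst_pvU mylist
  have hin : ∀ p ∈ pvU mylist, ∃ m : Nat, p.1 = (m : Int) ∧ m < mylist.length := by
    intro p hp
    obtain ⟨m, h1, hm, _⟩ := pvU_mem_spec mylist p hp
    exact ⟨m, h1, hm⟩
  have hmain := foldl_pvUpd_getElem (pvU mylist) mylist hdist hin j hj
  cases hfind : (pvU mylist).find? (fun p => p.1 == (j : Int)) with
  | none =>
    rw [hfind] at hmain
    have hc : (mylist.take j).count mylist[j] = 0 := by
      by_contra h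
      have hc1 : 1 ≤ (mylist.take j).count mylist[j] := Nat.one_le_iff_ne_zero.mpr h
      have hmem := pvU_mem_of mylist j hj hc1
      have := List.find?_eq_none.mp hfind _ hmem
      simp at this
    rw [hmain, pvRef_getElem mylist j hj, pvSuf, if_pos hc]
  | some p =>
    rw [hfind] at hmain
    have hpU := List.mem_of_find?_eq_some hfind
    have hpj : p.1 = (j : Int) := by simpa using List.find?_some hfind
    obtain ⟨m, hm1, hmlt, hc1, hp2⟩ := pvU_mem_spec mylist p hpU
    have hmj : m = j := by rw [hm1] at hpj; exact_mod_cast hpj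
    simp only [hmj] at hc1 hp2
    rw [hmain, pvRef_getElem mylist j hj, pvSuf, if_neg (by omega)]
    simp [hp2]

def altStep (st : PySem.Dict String Int × List String) (p : Int × String) :
    PySem.Dict String Int × List String :=
  if st.1.contains p.2 then
    let seen' := st.1.insert p.2 (st.1.getD p.2 0 + 1)
    (seen', PySem.List.pySetD st.2 p.1
      (PySem.List.pyGetD st.2 p.1 "" ++ PySem.Int.toStr (seen'.getD p.2 0)))
  else (st.1.insert p.2 0, st.2)

theorem set_append_cons {α : Type} (T : List α) (x v : α) (rest : List α) (n : Nat)
    (h : n = T.length) : (T ++ x :: rest).set n v = T ++ v :: rest := by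
  subst h; rw [List.set_append_right _ _ (le_refl _)]; simp

theorem getD_append_cons {α : Type} (T : List α) (x : α) (rest : List α) (d : α) (n : Nat)
    (h : n = T.length) : (T ++ x :: rest).getD n d = x := by
  subst h
  rw [List.getD_eq_getElem _ _ (by simp)]
  rw [List.getElem_append_right (le_refl _)]
  simp

theorem alt_loop (orig : List String) : ∀ (suf pre : List String) (seen : PySem.Dict String Int),
    orig = pre ++ suf →
    (∀ v, seen.contains v = decide (v ∈ pre)) →
    (∀ v ∈ pre, seen.getD v 0 = (pre.count v : Int) - 1) →
    ((PySem.List.enumerate suf (pre.length : Int)).foldl altStep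
      (seen, (pvRef orig).take pre.length ++ suf)).2 = pvRef orig := by
  intro suf
  induction suf with
  | nil =>
    intro pre seen horig _ _
    have hlen : pre.length = orig.length := by simp [horig]
    rw [PySem.List.enumerate_nil]
    simp only [List.foldl_nil]
    rw [List.append_nil, hlen, List.take_of_length_le (le_of_eq (length_pvRef orig))]
  | cons x rest ih =>
    intro pre seen horig hcont hgetD
    have hn : pre.length < orig.length := by simp [horig]
    have hnR : pre.length < (pvRef orig).length := by rw [length_pvRef]; exact hn
    have hTlen : ((pvRef orig).take pre.length).length = pre.length := by
      simp [length_pvRef]; omega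
    have htake : orig.take pre.length = pre := by
      rw [horig, List.take_left']; rfl
    have hat : orig[pre.length]'hn = x := by
      have h1 : orig[pre.length]? = some x := by
        rw [horig, List.getElem?_append_right (le_refl _)]; simp
      rw [List.getElem?_eq_getElem hn] at h1
      exact Option.some.inj h1
    have hget : PySem.List.pyGetD ((pvRef orig).take pre.length ++ x :: rest)
        ((pre.length : Int)) "" = x := by
      rw [PySem.List.pyGetD_natCast, getD_append_cons _ _ _ _ _ hTlen.symm]
    have hsetD : ∀ v : String, PySem.List.pySetD ((pvRef orig).take pre.length ++ x :: rest)
        ((pre.length : Int)) v = (pvRef orig).take pre.length ++ v :: rest := by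
      intro v
      rw [PySem.List.pySetD_natCast, set_append_cons _ _ _ _ _ hTlen.symm]
    have htakesucc : ∀ v : String, v = (pvRef orig)[pre.length]'hnR →
        (pvRef orig).take pre.length ++ v :: rest = (pvRef orig).take (pre.length+1) ++ rest := by
      intro v hv
      have hts : (pvRef orig).take (pre.length+1)
          = (pvRef orig).take pre.length ++ [(pvRef orig)[pre.length]'hnR] := by
        rw [List.take_add_one, List.getElem?_eq_getElem hnR]; rfl
      rw [hts, hv, List.append_assoc]; rfl
    have hcast : (pre.length : Int) + 1 = (((pre ++ [x]).length : Nat) : Int) := by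
      simp
    rw [PySem.List.enumerate_cons, List.foldl_cons]
    by_cases hx : x ∈ pre
    · have hc1 : 1 ≤ pre.count x := List.one_le_count_iff.mpr hx
      have hgx : seen.getD x 0 = (pre.count x : Int) - 1 := hgetD x hx
      have hrefn : (pvRef orig)[pre.length]'hnR
          = x ++ PySem.Int.toStr ((pre.count x : Int)) := by
        rw [pvRef_getElem orig pre.length hn, hat, pvSuf, htake]
        rw [if_neg (by omega)]
      have hstep : altStep (seen, (pvRef orig).take pre.length ++ x :: rest) ((pre.length : Int), x)
          = (seen.insert x (seen.getD x 0 + 1), (pvRef orig).take (pre.length+1) ++ rest) := by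
        simp only [altStep, hcont x, hx, decide_true, if_true]
        refine Prod.ext rfl ?_
        simp only
        rw [hget, hsetD, PySem.Dict.getD_insert_self]
        have h2 : seen.getD x 0 + 1 = ((pre.count x : Nat) : Int) := by rw [hgx]; ring
        rw [h2]
        exact htakesucc _ hrefn.symm
      rw [hstep, hcast]
      have := ih (pre ++ [x]) (seen.insert x (seen.getD x 0 + 1))
        (by simpa using horig)
        (by intro v
            rw [PySem.Dict.contains_insert]
            by_cases hv : v = x <;> simp [hv, hcont v])
        (by intro v hv
            by_cases hv' : v = x
            · subst hv'; rw [PySem.Dict.getD_insert_self, hgx]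
              simp [List.count_append]
            · rw [PySem.Dict.getD_insert_of_ne _ _ _ hv']
              have hvp : v ∈ pre := by simpa [hv'] using hv
              rw [hgetD v hvp]
              have hcnt : List.count v (pre ++ [x]) = List.count v pre := by
                simp [List.count_append, List.count_singleton]
                exact fun h => hv' h.symm
              rw [hcnt])
      simpa using this
    · have hrefn : (pvRef orig)[pre.length]'hnR = x := by
        rw [pvRef_getElem orig pre.length hn, hat, pvSuf, htake]
        rw [if_pos (List.count_eq_zero.mpr hx)]
      have hstep : altStep (seen, (pvRef orig).take pre.length ++ x :: rest) ((pre.length : Int), x)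
          = (seen.insert x 0, (pvRef orig).take (pre.length+1) ++ rest) := by
        simp only [altStep, hcont x, hx, decide_false]
        exact Prod.ext rfl (htakesucc _ hrefn.symm)
      rw [hstep, hcast]
      have := ih (pre ++ [x]) (seen.insert x 0)
        (by simpa using horig)
        (by intro v
            rw [PySem.Dict.contains_insert]
            by_cases hv : v = x <;> simp [hv, hcont v])
        (by intro v hv
            by_cases hv' : v = x
            · subst hv'; rw [PySem.Dict.getD_insert_self]
              simp [List.count_append, List.count_eq_zero.mpr hx]
            · rw [PySem.Dict.getD_insert_of_ne _ _ _ hv']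
              have hvp : v ∈ pre := by simpa [hv'] using hv
              rw [hgetD v hvp]
              have hcnt : List.count v (pre ++ [x]) = List.count v pre := by
                simp [List.count_append, List.count_singleton]
                exact fun h => hv' h.symm
              rw [hcnt])
      simpa using this

theorem alt_eq_pvRef (mylist : List String) : targList_alt mylist = pvRef mylist := by
  have h := alt_loop mylist mylist [] PySem.Dict.empty (by simp) (by simp) (by simp)
  simp only [List.length_nil, Nat.cast_zero, List.take_zero, List.nil_append] at h
  exact h

-- ===== VERDICT (by name: the statement is the Claim_ definition above) =====
theorem targList_spec : Claim_equal_targList := by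
  intro mylist _
  unfold Spec_targList
  rw [targ_eq_pvRef, alt_eq_pvRef]
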